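-- pv_equiv track=rewrite | github.com/Brandacy/information-extraction-baseline | data_helper.py | _get_token_idx
-- ===== SOURCE A (Python) =====
-- def _get_token_idx(sentence_term_list, sentence):
--     """Get the start offset of every token"""
--     token_idx_list = []
--     start_idx = 0
--     for sent_term in sentence_term_list:
--         if start_idx >= len(sentence):
--             break
--         token_idx_list.append(start_idx)
--         start_idx += len(sent_term)
--     return token_idx_list
-- ===== SOURCE B (Python) =====
-- def _get_token_idx(sentence_term_list, sentence):
--     """Get the start offset of every token"""
--     offsets = [0]
--     for t in sentence_term_list:
--         offsets.append(offsets[-1] + len(t))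
--     del offsets[-1]  # one offset per term: 0, l0, l0+l1, ...
--     n = len(sentence)
--     result = []
--     for x in offsets:
--         if x >= n:
--             break
--         result.append(x)
--     return result
-- ===== Notes on version B (the rewrite author's own statement) =====
-- stated objective: alternative
-- what changed: B is a staged decomposition: it first builds the full prefix-sum offset table (one offset per term, with no reference to the sentence), then truncates it at the first offset reaching len(sentence), instead of A's single incremental loop that checks the sentence length before each conditional append and breaks.
import Mathlib
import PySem

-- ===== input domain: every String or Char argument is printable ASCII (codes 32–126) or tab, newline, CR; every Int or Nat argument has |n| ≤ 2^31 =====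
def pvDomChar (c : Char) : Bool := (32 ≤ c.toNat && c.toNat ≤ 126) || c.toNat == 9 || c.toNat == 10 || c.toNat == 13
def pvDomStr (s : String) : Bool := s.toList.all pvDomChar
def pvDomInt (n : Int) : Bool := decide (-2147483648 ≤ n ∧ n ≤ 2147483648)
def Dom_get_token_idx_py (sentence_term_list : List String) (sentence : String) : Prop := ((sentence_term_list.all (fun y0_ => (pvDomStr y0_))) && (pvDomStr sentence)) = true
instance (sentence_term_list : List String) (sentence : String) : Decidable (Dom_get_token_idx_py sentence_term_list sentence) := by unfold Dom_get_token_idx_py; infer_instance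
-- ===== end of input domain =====

-- B builds the full prefix-sum offset table first, then truncates it at the first offset ≥ len(sentence); an alternative staged decomposition of A's break loop, same cost.

-- ===== PORT A =====
def goA (s : String) : List String → Int → List Int
  | [], _ => []
  | t :: ts, start_idx =>
    if start_idx ≥ PySem.Str.len s then []
    else start_idx :: goA s ts (start_idx + PySem.Str.len t)

def get_token_idx_py (sentence_term_list : List String) (sentence : String) : List Int :=
  goA sentence sentence_term_list 0

-- ===== PORT B =====
-- first loop of Source B: offsets.append(offsets[-1] + len(t)) over the terms, starting from [0]
def buildB (sentence_term_list : List String) : List Int :=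
  sentence_term_list.foldl (fun offsets t => offsets ++ [offsets.getLast! + PySem.Str.len t]) [0]

-- second loop of Source B: append until the first x ≥ n, then break
def takeB (n : Int) : List Int → List Int
  | [] => []
  | x :: xs => if x ≥ n then [] else x :: takeB n xs

def get_token_idx_py_alt (sentence_term_list : List String) (sentence : String) : List Int :=
  takeB (PySem.Str.len sentence) (buildB sentence_term_list).dropLast

-- ===== PRECONDITION & SPEC =====
def Spec_get_token_idx_py (sentence_term_list : List String) (sentence : String) (out : List Int) : Prop := out = get_token_idx_py_alt sentence_term_list sentence
instance (sentence_term_list : List String) (sentence : String) (out : List Int) : Decidable (Spec_get_token_idx_py sentence_term_list sentence out) := by unfold Spec_get_token_idx_py; infer_instance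

-- ===== CLAIM (what is proved, stated in full; the proofs are below) =====
def Claim_equal_get_token_idx_py : Prop := ∀ (sentence_term_list : List String) (sentence : String), Dom_get_token_idx_py sentence_term_list sentence → Spec_get_token_idx_py sentence_term_list sentence (get_token_idx_py sentence_term_list sentence)

-- ===== LEMMAS AND PROOFS =====
-- the offset table described structurally: one offset per term, plus the final total
def offs : List String → Int → List Int
  | [], a => [a]
  | t :: ts, a => a :: offs ts (a + PySem.Str.len t)

theorem offs_ne_nil (l : List String) (a : Int) : offs l a ≠ [] := by
  cases l <;> simp [offs]

theorem buildB_go (l : List String) (pre : List Int) (a : Int) :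
    l.foldl (fun offsets t => offsets ++ [offsets.getLast! + PySem.Str.len t]) (pre ++ [a])
      = pre ++ offs l a := by
  induction l generalizing pre a with
  | nil => simp [offs]
  | cons t ts ih =>
    simp only [List.foldl_cons, offs]
    have hlast : (pre ++ [a]).getLast! = a := by
      cases pre with
      | nil => simp [List.getLast!]
      | cons p ps => simp [List.getLast!, List.getLast_append]
    rw [hlast]
    have := ih (pre ++ [a]) (a + PySem.Str.len t)
    simpa using this

theorem buildB_eq (l : List String) : buildB l = offs l 0 := by
  have := buildB_go l [] 0
  simpa [buildB] using this

theorem goA_eq (s : String) (l : List String) (a : Int) :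
    goA s l a = takeB (PySem.Str.len s) (offs l a).dropLast := by
  induction l generalizing a with
  | nil => simp [goA, offs, takeB]
  | cons t ts ih =>
    have hne := offs_ne_nil ts (a + PySem.Str.len t)
    rw [goA, offs, List.dropLast_cons_of_ne_nil hne, takeB, ih]

-- ===== VERDICT (by name: the statement is the Claim_ definition above) =====
theorem get_token_idx_py_spec : Claim_equal_get_token_idx_py := by
  intro l s _
  show goA s l 0 = _
  rw [goA_eq]
  simp [get_token_idx_py_alt, buildB_eq]
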